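-- pv_equiv track=rewrite | github.com/XucroYuri/LocalVideo | backend/app/providers/video_capabilities.py | _normalize_resolution_values
-- ===== SOURCE A (Python) =====
-- from typing import Any
--
-- def _dedupe_non_empty_strings(values: list[str]) -> list[str]:
--     return list(dict.fromkeys(str(value).strip() for value in values if str(value).strip()))
--
-- def _normalize_resolution_values(values: list[Any]) -> list[str]:
--     normalized: list[str] = []
--     for value in values:
--         text = str(value).strip()
--         if not text:
--             continue
--         if text.isdigit():
--             text = f"{text}p"
--         normalized.append(text)
--     return _dedupe_non_empty_strings(normalized)
-- ===== SOURCE B (Python) =====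
-- def _normalize_resolution_values(values):
--     def norm(value):
--         text = str(value).strip()
--         return text + "p" if text.isdigit() else text
--
--     remaining = [t for t in map(norm, values) if t]
--     out = []
--     while remaining:
--         head = remaining[0]
--         out.append(head)
--         remaining = [t for t in remaining[1:] if t != head]
--     return out
-- ===== Notes on version B (the rewrite author's own statement) =====
-- stated objective: alternative
-- what changed: Replaces the seen-structure dedupe (dict.fromkeys over a staged normalized list) with a repeated head-extraction dedupe: after one map+filter normalization pass, a loop takes the first remaining element and filters every later duplicate out of the rest, so no auxiliary set/dict is kept at all.
import Mathlib
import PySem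

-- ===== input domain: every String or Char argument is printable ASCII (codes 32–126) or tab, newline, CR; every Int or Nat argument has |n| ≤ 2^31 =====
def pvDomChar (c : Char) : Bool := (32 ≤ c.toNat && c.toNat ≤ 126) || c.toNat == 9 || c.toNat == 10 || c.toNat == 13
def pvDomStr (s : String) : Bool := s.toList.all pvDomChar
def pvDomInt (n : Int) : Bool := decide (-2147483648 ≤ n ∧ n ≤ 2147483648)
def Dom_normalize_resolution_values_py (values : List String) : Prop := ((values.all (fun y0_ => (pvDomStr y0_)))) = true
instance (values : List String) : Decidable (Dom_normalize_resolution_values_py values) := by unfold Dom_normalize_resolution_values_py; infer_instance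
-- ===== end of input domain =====

-- B replaces A's dict.fromkeys dedupe of a staged list by repeated head-extraction:
-- one map+filter normalization pass, then a loop taking each first remaining element
-- and filtering its later duplicates out of the rest; objective: alternative.


-- ===== PORT A =====
-- helper _dedupe_non_empty_strings: list(dict.fromkeys(str(v).strip() for v in values if str(v).strip()))
def dedupe_non_empty_strings_py (values : List String) : List String :=
  PySem.List.dedup
    ((values.filter (fun value => !(PySem.Str.strip value == ""))).map
      (fun value => PySem.Str.strip value))

def normalize_resolution_values_py (values : List String) : List String :=
  let normalized := values.foldl (fun acc value =>
    let text := PySem.Str.strip value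
    if text = "" then acc
    else
      let text := if PySem.Str.strIsdigit text then text ++ "p" else text
      acc ++ [text]) []
  dedupe_non_empty_strings_py normalized

-- ===== PORT B =====
-- local helper norm: text = str(value).strip(); text + "p" if text.isdigit() else text
def pvAltNorm (value : String) : String :=
  let text := PySem.Str.strip value
  if PySem.Str.strIsdigit text then text ++ "p" else text

-- the while loop: take remaining[0], append it, filter it out of remaining[1:];
-- structural recursion on a length bound (the loop runs at most |remaining| times)
def pvHeadDedupGo : Nat → List String → List String
  | _, [] => []
  | 0, _ :: _ => []
  | n + 1, head :: rest => head :: pvHeadDedupGo n (rest.filter (fun t => !(t == head)))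

def pvHeadDedup (l : List String) : List String := pvHeadDedupGo l.length l

def normalize_resolution_values_py_alt (values : List String) : List String :=
  let remaining := (values.map pvAltNorm).filter (fun t => !(t == ""))
  pvHeadDedup remaining

-- ===== PRECONDITION & SPEC =====
def Spec_normalize_resolution_values_py (values : List String) (out : List String) : Prop := out = normalize_resolution_values_py_alt values
instance (values : List String) (out : List String) : Decidable (Spec_normalize_resolution_values_py values out) := by unfold Spec_normalize_resolution_values_py; infer_instance

-- ===== CLAIM =====
def Claim_equal_normalize_resolution_values_py : Prop := ∀ (values : List String), Dom_normalize_resolution_values_py values → Spec_normalize_resolution_values_py values (normalize_resolution_values_py values)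

-- ===== LEMMAS AND PROOFS =====

-- a char list with no whitespace at either end
def pvNoSpaceEnds (l : List Char) : Prop :=
  (∀ h : l ≠ [], PySem.Chars.isspace (l.head h) = false) ∧
  (∀ h : l ≠ [], PySem.Chars.isspace (l.getLast h) = false)

theorem pvStrip_eq_self (l : List Char) (h : pvNoSpaceEnds l) : PySem.Chars.strip l = l := by
  obtain ⟨h1, h2⟩ := h
  by_cases hne : l = []
  · subst hne; rfl
  · have hrne : l.reverse ≠ [] := by simpa using hne
    have hls : PySem.Chars.lstrip l = l := by
      unfold PySem.Chars.lstrip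
      rw [List.dropWhile_eq_self_iff]
      intro hl
      rw [← List.head_eq_getElem hne]
      simp [h1 hne]
    have hrs : PySem.Chars.rstrip l = l := by
      unfold PySem.Chars.rstrip
      have e : List.dropWhile PySem.Chars.isspace l.reverse = l.reverse := by
        rw [List.dropWhile_eq_self_iff]
        intro hl
        rw [← List.head_eq_getElem hrne, List.head_reverse hrne]
        simp [h2 hne]
      rw [e, List.reverse_reverse]
    unfold PySem.Chars.strip
    rw [hls, hrs]

theorem pvNoSpaceEnds_strip (cs : List Char) : pvNoSpaceEnds (PySem.Chars.strip cs) := by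
  constructor
  · intro h
    have hXne : List.dropWhile PySem.Chars.isspace (PySem.Chars.lstrip cs).reverse ≠ [] := by
      intro he
      apply h
      unfold PySem.Chars.strip PySem.Chars.rstrip
      rw [he]
      rfl
    obtain ⟨W, hW⟩ :=
      List.dropWhile_suffix (l := (PySem.Chars.lstrip cs).reverse) PySem.Chars.isspace
    have hlne : PySem.Chars.lstrip cs ≠ [] := by
      intro he
      apply hXne
      rw [he]
      rfl
    have hchain : (PySem.Chars.strip cs).head? = (PySem.Chars.lstrip cs).head? := by
      unfold PySem.Chars.strip PySem.Chars.rstrip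
      rw [List.head?_reverse, ← List.getLast?_append_of_ne_nil W hXne, hW, List.getLast?_reverse]
    rw [List.head?_eq_head h, List.head?_eq_head hlne] at hchain
    rw [Option.some.inj hchain]
    unfold PySem.Chars.lstrip
    exact List.head_dropWhile_not _ _
  · intro h
    have hXne : List.dropWhile PySem.Chars.isspace (PySem.Chars.lstrip cs).reverse ≠ [] := by
      intro he
      apply h
      unfold PySem.Chars.strip PySem.Chars.rstrip
      rw [he]
      rfl
    have hchain : (PySem.Chars.strip cs).getLast? =
        (List.dropWhile PySem.Chars.isspace (PySem.Chars.lstrip cs).reverse).head? := by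
      unfold PySem.Chars.strip PySem.Chars.rstrip
      rw [List.getLast?_reverse]
    rw [List.getLast?_eq_getLast h, List.head?_eq_head hXne] at hchain
    rw [Option.some.inj hchain]
    exact List.head_dropWhile_not _ _

theorem pvNoSpaceEnds_concat_p (l : List Char) (h : pvNoSpaceEnds l) :
    pvNoSpaceEnds (l ++ ['p']) := by
  obtain ⟨h1, h2⟩ := h
  constructor
  · intro hne
    by_cases hl : l = []
    · subst hl
      exact (by decide : PySem.Chars.isspace 'p' = false)
    · rw [List.head_append_of_ne_nil hl]
      exact h1 hl
  · intro hne
    rw [List.getLast_append_right (by simp : ['p'] ≠ ([] : List Char))]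
    exact (by decide : PySem.Chars.isspace 'p' = false)

theorem pvStrip_norm (v : String) : PySem.Str.strip (pvAltNorm v) = pvAltNorm v := by
  apply String.toList_inj.mp
  rw [PySem.Str.toList_strip]
  unfold pvAltNorm
  by_cases hd : PySem.Str.strIsdigit (PySem.Str.strip v) = true
  · rw [if_pos hd]
    have ht : (PySem.Str.strip v ++ "p").toList = PySem.Chars.strip v.toList ++ ['p'] := by
      rw [String.toList_append, PySem.Str.toList_strip]; rfl
    simp only [ht]
    exact pvStrip_eq_self _ (pvNoSpaceEnds_concat_p _ (pvNoSpaceEnds_strip _))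
  · rw [if_neg hd, PySem.Str.toList_strip]
    exact pvStrip_eq_self _ (pvNoSpaceEnds_strip _)

theorem pvNorm_empty_iff (v : String) : pvAltNorm v = "" ↔ PySem.Str.strip v = "" := by
  unfold pvAltNorm
  by_cases hd : PySem.Str.strIsdigit (PySem.Str.strip v) = true
  · rw [if_pos hd]
    constructor
    · intro he
      have : (PySem.Str.strip v ++ "p").toList = ("" : String).toList := by rw [he]
      rw [String.toList_append] at this
      simp at this
    · intro he
      rw [he] at hd
      exact absurd hd (by decide)
  · rw [if_neg hd]

-- A's first loop produces exactly the normalized, filtered list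
theorem pvA_loop (values : List String) :
    values.foldl (fun acc value =>
      let text := PySem.Str.strip value
      if text = "" then acc
      else
        let text := if PySem.Str.strIsdigit text then text ++ "p" else text
        acc ++ [text]) [] =
    (values.filter (fun v => decide (PySem.Str.strip v ≠ ""))).map pvAltNorm := by
  have h := PySem.List.foldl_congr_mem
    (l := values)
    (init := ([] : List String))
    (f := fun acc value =>
      let text := PySem.Str.strip value
      if text = "" then acc
      else
        let text := if PySem.Str.strIsdigit text then text ++ "p" else text
        acc ++ [text])
    (g := fun acc value => if PySem.Str.strip value ≠ "" then acc ++ [pvAltNorm value] else acc)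
    (by
      intro acc x _
      by_cases hx : PySem.Str.strip x = "" <;> simp [hx, pvAltNorm])
  rw [h, PySem.List.foldl_append_ite (p := fun v => PySem.Str.strip v ≠ "") (f := pvAltNorm)]
  simp

-- A's dedupe pass: on a list of stable non-empty strings it is just the ordered dedup
theorem pvDedupe_stable (xs : List String)
    (hstab : ∀ x ∈ xs, PySem.Str.strip x = x)
    (hne : ∀ x ∈ xs, x ≠ "") :
    dedupe_non_empty_strings_py xs = PySem.List.dedup xs := by
  unfold dedupe_non_empty_strings_py
  have hf : xs.filter (fun value => !(PySem.Str.strip value == "")) = xs := by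
    apply List.filter_eq_self.mpr
    intro x hx
    simp [hstab x hx, hne x hx]
  rw [hf]
  have hm : xs.map (fun value => PySem.Str.strip value) = xs := by
    rw [List.map_congr_left (fun x hx => hstab x hx)]
    exact List.map_id' xs
  rw [hm]

-- skipping elements already in the accumulator: filtering a present element away is a no-op
theorem pvFoldl_add_filter (h : String) (t : List String) :
    ∀ s : PySem.Set String, h ∈ s →
      t.foldl PySem.Set.add s = (t.filter (fun x => !(x == h))).foldl PySem.Set.add s := by
  induction t with
  | nil => intro s _; rfl
  | cons x xs ih =>
    intro s hs
    by_cases hx : x = h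
    · subst hx
      have hadd : PySem.Set.add s x = s := by
        simp [PySem.Set.add, PySem.Set.contains, hs]
      simp [List.filter_cons, hadd]
      exact ih s hs
    · simp [List.filter_cons, hx]
      exact ih (PySem.Set.add s x) (by simp [PySem.Set.add]; split <;> simp [hs])

-- an element absent from the rest of the fold can be moved out of the accumulator
theorem pvFoldl_add_cons (h : String) (t : List String) :
    ∀ s : List String, (∀ x ∈ t, x ≠ h) →
      t.foldl PySem.Set.add (h :: s) = h :: t.foldl PySem.Set.add s := by
  induction t with
  | nil => intro s _; rfl
  | cons x xs ih =>
    intro s hne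
    have hx : x ≠ h := hne x (List.mem_cons_self)
    have hc : PySem.Set.contains (h :: s) x = PySem.Set.contains s x := by
      simp [PySem.Set.contains, hx]
    simp only [List.foldl_cons, PySem.Set.add, hc]
    by_cases hm : PySem.Set.contains s x = true
    · rw [if_pos hm, if_pos hm]
      exact ih s (fun y hy => hne y (List.mem_cons_of_mem _ hy))
    · rw [if_neg hm, if_neg hm]
      have e : (h :: s) ++ [x] = h :: (s ++ [x]) := rfl
      rw [e]
      exact ih (s ++ [x]) (fun y hy => hne y (List.mem_cons_of_mem _ hy))

-- the head-extraction dedupe computes exactly Python's ordered dedup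
theorem pvHeadDedupGo_eq_dedup (n : Nat) :
    ∀ l : List String, l.length ≤ n → pvHeadDedupGo n l = PySem.List.dedup l := by
  induction n with
  | zero =>
    intro l hl
    have : l = [] := List.eq_nil_of_length_eq_zero (Nat.le_zero.mp hl)
    subst this
    simp [pvHeadDedupGo, PySem.List.dedup_eq_ofList, PySem.Set.ofList_eq_foldl]
  | succ n ih =>
    intro l hl
    cases l with
    | nil => simp [pvHeadDedupGo, PySem.List.dedup_eq_ofList, PySem.Set.ofList_eq_foldl]
    | cons h t =>
      show h :: pvHeadDedupGo n (t.filter (fun x => !(x == h))) = _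
      have hrec : pvHeadDedupGo n (t.filter (fun x => !(x == h))) =
          PySem.List.dedup (t.filter (fun x => !(x == h))) := by
        apply ih
        exact (List.length_filter_le _ _).trans (Nat.le_of_succ_le_succ hl)
      rw [hrec]
      -- both sides are ofList computations
      rw [PySem.List.dedup_eq_ofList, PySem.List.dedup_eq_ofList, PySem.Set.ofList_eq_foldl,
        PySem.Set.ofList_eq_foldl]
      have h1 : (h :: t).foldl PySem.Set.add [] = t.foldl PySem.Set.add [h] := by
        simp [PySem.Set.add, PySem.Set.contains]
      rw [h1, pvFoldl_add_filter h t [h] (List.mem_singleton.mpr rfl)]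
      have h2 := pvFoldl_add_cons h (t.filter (fun x => !(x == h))) []
        (by intro x hx; simpa using (List.mem_filter.mp hx).2)
      exact h2.symm

theorem pvHeadDedup_eq_dedup (l : List String) : pvHeadDedup l = PySem.List.dedup l :=
  pvHeadDedupGo_eq_dedup l.length l (Nat.le_refl _)

-- ===== VERDICT =====
theorem normalize_resolution_values_py_spec : Claim_equal_normalize_resolution_values_py := by
  intro values _
  unfold Spec_normalize_resolution_values_py
  simp only [normalize_resolution_values_py, normalize_resolution_values_py_alt]
  rw [pvA_loop]
  have hfm : (values.map pvAltNorm).filter (fun t => !(t == "")) =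
      (values.filter (fun v => decide (PySem.Str.strip v ≠ ""))).map pvAltNorm := by
    rw [List.filter_map]
    congr 1
    apply List.filter_congr
    intro v _
    by_cases hv : PySem.Str.strip v = ""
    · simp [Function.comp, hv, (pvNorm_empty_iff v).mpr hv]
    · have h2 : pvAltNorm v ≠ "" := fun he => hv ((pvNorm_empty_iff v).mp he)
      simp [Function.comp, hv, h2]
  rw [hfm, pvHeadDedup_eq_dedup]
  set m := (values.filter (fun v => decide (PySem.Str.strip v ≠ ""))).map pvAltNorm with hm
  have hstab : ∀ x ∈ m, PySem.Str.strip x = x := by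
    intro x hx
    rw [hm] at hx
    obtain ⟨v, _, rfl⟩ := List.mem_map.mp hx
    exact pvStrip_norm v
  have hne : ∀ x ∈ m, x ≠ "" := by
    intro x hx
    rw [hm] at hx
    obtain ⟨v, hv, rfl⟩ := List.mem_map.mp hx
    exact fun he => by
      have := (pvNorm_empty_iff v).mp he
      have h2 : PySem.Str.strip v ≠ "" := by simpa using (List.mem_filter.mp hv).2
      exact h2 this
  rw [pvDedupe_stable m hstab hne]
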